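-- pv_equiv track=rewrite | github.com/honey-lee/Algorithm---Programmers | Python - Level1/폰켓몬/폰켓몬.py | solution
-- ===== SOURCE A (Python) =====
-- def solution(nums):
--     k = len(nums)
--     answer = []
--
--     nums_set = set(nums)
--
--     for i in nums_set:
--         if len(answer) < k//2:
--             answer.append(i)
--
--     return len(answer)
-- ===== SOURCE B (Python) =====
-- def solution(nums):
--     return min(len(set(nums)), len(nums) // 2)
-- ===== Notes on version B (the rewrite author's own statement) =====
-- stated objective: simpler
-- what changed: Replaced the bounded accumulation loop over the set (appending until the list reaches k//2 and returning its length) with the closed form min(len(set(nums)), len(nums)//2).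
import Mathlib
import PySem

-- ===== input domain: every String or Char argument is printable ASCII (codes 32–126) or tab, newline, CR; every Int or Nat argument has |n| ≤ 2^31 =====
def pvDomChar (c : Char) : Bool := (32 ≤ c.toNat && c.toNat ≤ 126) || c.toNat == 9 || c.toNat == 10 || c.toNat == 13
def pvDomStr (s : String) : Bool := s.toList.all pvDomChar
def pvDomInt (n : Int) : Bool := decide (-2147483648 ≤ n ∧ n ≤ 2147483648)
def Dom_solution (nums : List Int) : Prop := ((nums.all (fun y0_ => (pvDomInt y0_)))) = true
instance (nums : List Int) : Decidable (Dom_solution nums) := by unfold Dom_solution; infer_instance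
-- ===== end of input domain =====

-- B: replaces the bounded counting loop with the closed form min(|set(nums)|, len(nums)//2) — simpler.


-- ===== PORT A =====
-- Port of A: iterate the set's distinct elements, appending while len(answer) < k//2.
def solution (nums : List Int) : Int :=
  let k := nums.length
  let numsSet : PySem.Set Int := PySem.Set.ofList nums
  let answer : List Int :=
    numsSet.foldl (fun acc i => if acc.length < k / 2 then acc ++ [i] else acc) []
  (answer.length : Int)

-- ===== PORT B =====
-- Port of B: closed form min(|set(nums)|, len(nums)//2).
def solution_alt (nums : List Int) : Int :=
  (min (PySem.Set.ofList nums).length (nums.length / 2) : Nat)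

-- ===== PRECONDITION & SPEC =====
def Spec_solution (nums : List Int) (out : Int) : Prop := out = solution_alt nums
instance (nums : List Int) (out : Int) : Decidable (Spec_solution nums out) := by unfold Spec_solution; infer_instance

-- ===== CLAIM (what is proved, stated in full; the proofs are below) =====
def Claim_equal_solution : Prop := ∀ (nums : List Int), Dom_solution nums → Spec_solution nums (solution nums)

-- ===== LEMMAS AND PROOFS =====

-- ===== VERDICT (by name: the statement is the Claim_ definition above) =====
-- Length of the bounded-append fold: min (start + list length) bound, given start ≤ bound.
theorem foldl_bounded_len (m : Nat) (l acc : List Int) (h : acc.length ≤ m) :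
    (l.foldl (fun acc i => if acc.length < m then acc ++ [i] else acc) acc).length
      = min (acc.length + l.length) m := by
  induction l generalizing acc with
  | nil => simp; omega
  | cons x xs ih =>
    simp only [List.foldl_cons]
    by_cases hlt : acc.length < m
    · rw [if_pos hlt, ih _ (by simp; omega)]
      simp; omega
    · rw [if_neg hlt, ih _ h]
      have : acc.length = m := by omega
      simp [this]

theorem solution_spec : Claim_equal_solution := by
  intro nums _
  unfold Spec_solution solution solution_alt
  simp only []
  rw [foldl_bounded_len _ _ _ (by simp)]
  simp [Nat.min_comm]
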